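-- pv_equiv track=rewrite | github.com/siederslebenEtAl2019/artificial-intelligence | src/bayes/util/binaries.py | binary_cube
-- ===== SOURCE A (Python) =====
-- def binary_cube(pattern):
--     """
--        :param: pattern is a list of 0, 1 and None
--        :return: projection of binary cube of dimension = n
--        [0, None, 1] -> [0, 0, 1], [0, 1, 1]
--        [0, None, None] -> [0, 0, 0], [0, 0, 1], [0, 1, 0], [0, 1, 1]
--        """
--     current = list(pattern)
--     nones = [i for (i, v) in enumerate(pattern) if pattern[i] is None]
--     k = len(nones)
--     if k == 0:
--         yield current
--     else:
--         for j in range(2 ** k):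
--             b = int2bin(j, k)
--             current = current.copy()
--             for i in range(k):
--                 current[nones[i]] = b[i]
--             yield current
--
-- def int2bin(i, n):
--     """
--     :param i: an integer >= 0
--     :param n: length of list
--     :return: binary digits of i as a list of length at least n
--     6, 3 -> [1, 1, 0]
--     6, 4 -> [0, 1, 1, 0]
--     """
--     return [int(c) for c in bin(i)[2:].rjust(n, '0')]
-- ===== SOURCE B (Python) =====
-- def binary_cube(pattern):
--     """Recursive decomposition: expand the pattern head, prepend to completions of the tail;
--     at a None the 0-branch precedes the 1-branch, so the first None is the slowest-varying bit."""
--     if not pattern: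
--         yield []
--         return
--     head = pattern[0]
--     rest = pattern[1:]
--     heads = [0, 1] if head is None else [head]
--     for h in heads:
--         for tail in binary_cube(rest):
--             yield [h] + tail
-- ===== Notes on version B (the rewrite author's own statement) =====
-- stated objective: alternative
-- what changed: Replaces the counter loop over range(2**k) with int2bin bit-string decoding and index assignment into nones positions by a structural recursion on the pattern itself: each None head branches into a 0-prefix block followed by a 1-prefix block over the recursively built completions of the tail, yielding the identical order.
import Mathlib
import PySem

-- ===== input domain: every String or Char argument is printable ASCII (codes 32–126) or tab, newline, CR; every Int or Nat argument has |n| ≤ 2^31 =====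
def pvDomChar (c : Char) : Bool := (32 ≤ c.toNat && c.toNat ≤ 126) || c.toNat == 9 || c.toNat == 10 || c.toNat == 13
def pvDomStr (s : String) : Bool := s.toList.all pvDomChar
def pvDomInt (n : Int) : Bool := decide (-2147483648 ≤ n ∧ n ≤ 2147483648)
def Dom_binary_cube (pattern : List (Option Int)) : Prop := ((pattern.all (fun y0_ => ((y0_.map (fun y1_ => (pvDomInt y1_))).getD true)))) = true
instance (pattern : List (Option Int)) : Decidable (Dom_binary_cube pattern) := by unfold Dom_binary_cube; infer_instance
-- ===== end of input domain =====

-- B replaces the range(2**k)/int2bin index-assignment enumeration by a structural recursion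
-- on the pattern (0-branch before 1-branch at each None), same values in the same order.

-- ===== PORT A =====
-- bin(j)[2:] for j > 0, as a digit list (bin(0)[2:] would be "0", handled in int2bin)
def pyBinDigits (j : Nat) : List Int :=
  if _h : j = 0 then [] else pyBinDigits (j / 2) ++ [((j % 2 : Nat) : Int)]
decreasing_by exact Nat.div_lt_self (Nat.pos_of_ne_zero _h) (by norm_num)

-- int2bin(i, n): digits of bin(i)[2:] right-justified with '0' to length n (i ≥ 0 at every call site)
def int2bin (i : Nat) (n : Nat) : List Int :=
  let s := if i = 0 then [(0 : Int)] else pyBinDigits i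
  List.replicate (n - s.length) 0 ++ s

def binary_cube (pattern : List (Option Int)) : List (List Int) :=
  let current := pattern
  -- [i for (i, v) in enumerate(pattern) if pattern[i] is None]
  let nones := ((pattern.zipIdx.filter (fun p => p.1 == none)).map (·.2))
  let k := nones.length
  if k = 0 then
    [current.map (fun o => o.getD 0)]  -- no None is present here, so getD is exact
  else
    (List.range (2 ^ k)).map (fun j =>
      let b := int2bin j k
      let cur := (List.range k).foldl
        (fun c i => c.set (nones.getD i 0) (some (b.getD i 0))) current
      cur.map (fun o => o.getD 0))  -- every None position was overwritten, so getD is exact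

-- ===== PORT B =====
def binary_cube_alt : List (Option Int) → List (List Int)
  | [] => [[]]
  | head :: rest =>
    let heads : List Int := match head with
      | none => [0, 1]
      | some v => [v]
    heads.flatMap (fun h => (binary_cube_alt rest).map (fun t => h :: t))

-- ===== PRECONDITION & SPEC =====
def Spec_binary_cube (pattern : List (Option Int)) (out : List (List Int)) : Prop := out = binary_cube_alt pattern
instance (pattern : List (Option Int)) (out : List (List Int)) : Decidable (Spec_binary_cube pattern out) := by unfold Spec_binary_cube; infer_instance

-- ===== CLAIM (what is proved, stated in full; the proofs are below) =====
def Claim_equal_binary_cube : Prop := ∀ (pattern : List (Option Int)), Dom_binary_cube pattern → Spec_binary_cube pattern (binary_cube pattern)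

-- ===== LEMMAS AND PROOFS =====

-- indices of the None entries of a pattern
def noneIdx : List (Option Int) → List Nat
  | [] => []
  | none :: r => 0 :: (noneIdx r).map (· + 1)
  | some _ :: r => (noneIdx r).map (· + 1)

-- substitute the bits bs at the None positions (missing bits become 0, extra bits are ignored)
def fill : List (Option Int) → List Int → List Int
  | [], _ => []
  | some v :: r, bs => v :: fill r bs
  | none :: r, b :: bs => b :: fill r bs
  | none :: r, [] => 0 :: fill r []

def setPairs (cur : List (Option Int)) (ps : List (Nat × Int)) : List (Option Int) :=
  ps.foldl (fun c q => c.set q.1 (some q.2)) cur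

lemma zipIdx_filter_none (p : List (Option Int)) (n : Nat) :
    ((p.zipIdx n).filter (fun q => q.1.isNone)).map (·.2) = (noneIdx p).map (· + n) := by
  induction p generalizing n with
  | nil => simp [noneIdx]
  | cons h r ih =>
    cases h with
    | none =>
      simp only [List.zipIdx_cons, List.filter_cons, noneIdx, List.map_cons, List.map_map]
      norm_num
      rw [ih (n + 1)]
      apply List.map_congr_left; intro a _; omega
    | some v =>
      simp only [List.zipIdx_cons, List.filter_cons, noneIdx, List.map_map]
      norm_num
      rw [ih (n + 1)]
      apply List.map_congr_left; intro a _; omega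

lemma nones_eq (p : List (Option Int)) :
    ((p.zipIdx.filter (fun q => q.1 == none)).map (·.2)) = noneIdx p := by
  have hpred : (fun (q : Option Int × Nat) => q.1 == none) = (fun q => q.1.isNone) := by
    funext q; cases q.1 <;> rfl
  rw [hpred]
  have := zipIdx_filter_none p 0
  simpa using this

lemma fill_nil (p : List (Option Int)) : fill p [] = p.map (fun o => o.getD 0) := by
  induction p with
  | nil => simp [fill]
  | cons h r ih => cases h <;> simp [fill, ih]

lemma fill_congr (p : List (Option Int)) (bs : List Int) (h : noneIdx p = []) :
    fill p bs = p.map (fun o => o.getD 0) := by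
  induction p generalizing bs with
  | nil => simp [fill]
  | cons x r ih =>
    cases x with
    | none => simp [noneIdx] at h
    | some v =>
      simp [noneIdx] at h
      simp [fill, ih bs h]

lemma setPairs_shift (ps : List (Nat × Int)) (x : Option Int) (r : List (Option Int)) :
    setPairs (x :: r) (ps.map (fun q => (q.1 + 1, q.2))) = x :: setPairs r ps := by
  induction ps generalizing x r with
  | nil => simp [setPairs]
  | cons q ps ih => simp [setPairs, List.foldl_cons] at ih ⊢; exact ih x (r.set q.1 (some q.2))

lemma rangefold_eq_setPairs (ns : List Nat) (bs : List Int) (cur : List (Option Int))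
    (hle : ns.length ≤ bs.length) :
    (List.range ns.length).foldl (fun c i => c.set (ns.getD i 0) (some (bs.getD i 0))) cur
      = setPairs cur (ns.zip bs) := by
  induction ns generalizing bs cur with
  | nil => simp [setPairs]
  | cons n ns ih =>
    cases bs with
    | nil => simp at hle
    | cons b bs =>
      rw [List.length_cons, List.range_succ_eq_map, List.foldl_cons, List.foldl_map]
      simp only [List.getD_cons_succ, List.getD_cons_zero]
      rw [ih bs _ (by simpa using hle)]
      simp [setPairs]

lemma setPairs_fill (p : List (Option Int)) (bs : List Int) :
    (setPairs p ((noneIdx p).zip bs)).map (fun o => o.getD 0) = fill p bs := by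
  induction p generalizing bs with
  | nil => simp [setPairs, noneIdx, fill]
  | cons x r ih =>
    cases x with
    | some v =>
      have hz : ((noneIdx r).map (· + 1)).zip bs
          = ((noneIdx r).zip bs).map (fun q => (q.1 + 1, q.2)) := by
        simp [List.zip_map_left, Prod.map]
      simp only [noneIdx, hz, setPairs_shift, fill, List.map_cons, Option.getD_some, ih bs]
    | none =>
      cases bs with
      | nil =>
        simp [noneIdx, setPairs, fill, fill_nil]
      | cons b bs =>
        have hz : ((noneIdx r).map (· + 1)).zip bs
            = ((noneIdx r).zip bs).map (fun q => (q.1 + 1, q.2)) := by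
          simp [List.zip_map_left, Prod.map]
        simp only [noneIdx, List.zip_cons_cons, hz, setPairs, List.foldl_cons]
        simp only [List.set]
        have := setPairs_shift ((noneIdx r).zip bs) (some b) r
        simp only [setPairs] at this
        rw [this]
        simp only [List.map_cons, Option.getD_some, fill]
        have h2 := ih bs
        simp only [setPairs] at h2
        rw [h2]

lemma pyBinDigits_zero : pyBinDigits 0 = [] := by rw [pyBinDigits]; rfl

lemma pyBinDigits_one : pyBinDigits 1 = [1] := by
  rw [pyBinDigits]; norm_num [pyBinDigits_zero]

lemma pyBinDigits_len (k : Nat) : ∀ j, j < 2 ^ k → (pyBinDigits j).length ≤ k := by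
  induction k with
  | zero => intro j hj; interval_cases j; simp [pyBinDigits]
  | succ k ih =>
    intro j hj
    by_cases h : j = 0
    · subst h; simp [pyBinDigits]
    · rw [pyBinDigits, dif_neg h]
      have : j / 2 < 2 ^ k := by
        rw [Nat.div_lt_iff_lt_mul (by norm_num)]
        calc j < 2 ^ (k + 1) := hj
        _ = 2 ^ k * 2 := by ring
      have := ih _ this
      simp; omega

lemma dig_len (k j : Nat) (hk : 1 ≤ k) (hj : j < 2 ^ k) :
    (if j = 0 then [(0 : Int)] else pyBinDigits j).length ≤ k := by
  by_cases h : j = 0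
  · simp [h]; omega
  · rw [if_neg h]; exact pyBinDigits_len k j hj

lemma int2bin_len (j n : Nat) : n ≤ (int2bin j n).length := by
  simp [int2bin]; omega

lemma int2bin_cons0 (k j : Nat) (hk : 1 ≤ k) (hj : j < 2 ^ k) :
    int2bin j (k + 1) = 0 :: int2bin j k := by
  have hL := dig_len k j hk hj
  simp only [int2bin]
  rw [show k + 1 - (if j = 0 then [(0:Int)] else pyBinDigits j).length
      = (k - (if j = 0 then [(0:Int)] else pyBinDigits j).length) + 1 by omega]
  rw [List.replicate_succ]
  simp

lemma int2bin_step (k j : Nat) (hk : 1 ≤ k) :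
    int2bin j (k + 1) = int2bin (j / 2) k ++ [((j % 2 : Nat) : Int)] := by
  rcases Nat.lt_or_ge j 2 with hj | hj
  · interval_cases j
    · simp only [int2bin, Nat.zero_div]
      norm_num
      obtain ⟨m, rfl⟩ : ∃ m, k = m + 1 := ⟨k - 1, by omega⟩
      simp [List.replicate_succ', List.append_assoc]
    · simp only [int2bin, pyBinDigits_one]
      norm_num
      obtain ⟨m, rfl⟩ : ∃ m, k = m + 1 := ⟨k - 1, by omega⟩
      simp [List.replicate_succ', List.append_assoc]
  · have hne : j ≠ 0 := by omega
    have hne2 : j / 2 ≠ 0 := by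
      intro h; have := Nat.div_add_mod j 2; omega
    have hd : pyBinDigits j = pyBinDigits (j / 2) ++ [((j % 2 : Nat) : Int)] := by
      rw [pyBinDigits, dif_neg hne]
    simp only [int2bin, if_neg hne, if_neg hne2, hd]
    rw [List.length_append]
    simp [List.append_assoc]

lemma int2bin_hi (k : Nat) (hk : 1 ≤ k) : ∀ j, j < 2 ^ k →
    int2bin (2 ^ k + j) (k + 1) = 1 :: int2bin j k := by
  induction k with
  | zero => omega
  | succ k ih =>
    intro j hj
    by_cases hk0 : k = 0
    · subst hk0
      have h2 : pyBinDigits 2 = [1, 0] := by rw [pyBinDigits]; norm_num [pyBinDigits_one]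
      have h3 : pyBinDigits 3 = [1, 1] := by rw [pyBinDigits]; norm_num [pyBinDigits_one]
      interval_cases j <;> simp [int2bin, h2, h3, pyBinDigits_one]
    · have hk1 : 1 ≤ k := by omega
      have hdiv : (2 ^ (k + 1) + j) / 2 = 2 ^ k + j / 2 := by
        rw [pow_succ]
        omega
      have hmod : (2 ^ (k + 1) + j) % 2 = j % 2 := by
        rw [pow_succ]
        omega
      rw [int2bin_step (k + 1) _ (by omega), hdiv, hmod,
          ih hk1 (j / 2) (by
            rw [Nat.div_lt_iff_lt_mul (by norm_num)]
            calc j < 2 ^ (k + 1) := hj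
            _ = 2 ^ k * 2 := by ring),
          int2bin_step k j hk1]
      simp

lemma alt_eq_fill (p : List (Option Int)) :
    binary_cube_alt p
      = (List.range (2 ^ (noneIdx p).length)).map (fun j => fill p (int2bin j (noneIdx p).length)) := by
  induction p with
  | nil => simp [binary_cube_alt, noneIdx, fill]
  | cons x r ih =>
    cases x with
    | some v =>
      simp only [binary_cube_alt, noneIdx, List.length_map, List.flatMap_cons,
        List.flatMap_nil, List.append_nil, ih, List.map_map]
      apply List.map_congr_left
      intro j _
      simp [fill]
    | none =>
      have hlen : (noneIdx (none :: r)).length = (noneIdx r).length + 1 := by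
        simp [noneIdx]
      rw [hlen]
      have hsplit : (2 : Nat) ^ ((noneIdx r).length + 1) = 2 ^ (noneIdx r).length + 2 ^ (noneIdx r).length := by
        ring
      rw [hsplit, List.range_add, List.map_append, List.map_map]
      simp only [binary_cube_alt, List.flatMap_cons, List.flatMap_nil, List.append_nil, ih,
        List.map_map]
      congr 1
      · apply List.map_congr_left
        intro j hj
        simp only [List.mem_range] at hj
        by_cases hk0 : (noneIdx r).length = 0
        · have hr : noneIdx r = [] := List.eq_nil_of_length_eq_zero hk0
          rw [hk0] at hj ⊢
          interval_cases j
          have h01 : int2bin 0 1 = [0] := by decide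
          have h00 : int2bin 0 0 = [0] := by decide
          simp [Function.comp, h01, h00, fill, fill_congr r _ hr]
        · have hk1 : 1 ≤ (noneIdx r).length := by omega
          simp [Function.comp, int2bin_cons0 _ j hk1 hj, fill]
      · apply List.map_congr_left
        intro j hj
        simp only [List.mem_range] at hj
        by_cases hk0 : (noneIdx r).length = 0
        · have hr : noneIdx r = [] := List.eq_nil_of_length_eq_zero hk0
          rw [hk0] at hj ⊢
          interval_cases j
          have h11 : int2bin 1 1 = [1] := by simp [int2bin, pyBinDigits_one]
          simp [Function.comp, h11, fill, fill_congr r _ hr]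
        · have hk1 : 1 ≤ (noneIdx r).length := by omega
          simp [Function.comp, int2bin_hi _ hk1 j hj, fill]

lemma a_eq_fill (p : List (Option Int)) :
    binary_cube p
      = (List.range (2 ^ (noneIdx p).length)).map (fun j => fill p (int2bin j (noneIdx p).length)) := by
  simp only [binary_cube, nones_eq]
  by_cases hk : (noneIdx p).length = 0
  · have hr : noneIdx p = [] := List.eq_nil_of_length_eq_zero hk
    rw [if_pos hk, hk]
    simp [fill_congr p _ hr]
  · rw [if_neg hk]
    apply List.map_congr_left
    intro j _
    rw [rangefold_eq_setPairs _ _ _ (int2bin_len j _)]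
    exact setPairs_fill p (int2bin j (noneIdx p).length)

-- ===== VERDICT (by name: the statement is the Claim_ definition above) =====
theorem binary_cube_spec : Claim_equal_binary_cube := by
  intro pattern _
  show binary_cube pattern = binary_cube_alt pattern
  rw [a_eq_fill, alt_eq_fill]
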